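-- pv_equiv track=rewrite | github.com/leopoldi44/vault44 | movie_downloader2.py | select_best
-- ===== SOURCE A (Python) =====
-- def select_best(results):
--     qualities = ["2160p", "1080p", "720p"]
--     yts_results = [r for r in results if r.get("engine") == "YTS"]
--     for q in qualities:
--         for r in yts_results:
--             if r.get("quality") == q:
--                 return r
--     if results:
--         return results[0]
--     return None
-- ===== SOURCE B (Python) =====
-- def select_best(results):
--     priority = {"2160p": 0, "1080p": 1, "720p": 2}
--     best = None
--     for r in results:
--         if r.get("engine") == "YTS" and r.get("quality") in priority:
--             if best is None or priority[r["quality"]] < priority[best["quality"]]: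
--                 best = r
--     if best is not None:
--         return best
--     return results[0] if results else None
-- ===== Notes on version B (the rewrite author's own statement) =====
-- stated objective: simpler
-- what changed: Replaces A's intermediate YTS list plus nested quality-by-quality rescan with a single pass over results keeping the best-priority YTS candidate seen so far (priority dict, first wins on ties).
import Mathlib
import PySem

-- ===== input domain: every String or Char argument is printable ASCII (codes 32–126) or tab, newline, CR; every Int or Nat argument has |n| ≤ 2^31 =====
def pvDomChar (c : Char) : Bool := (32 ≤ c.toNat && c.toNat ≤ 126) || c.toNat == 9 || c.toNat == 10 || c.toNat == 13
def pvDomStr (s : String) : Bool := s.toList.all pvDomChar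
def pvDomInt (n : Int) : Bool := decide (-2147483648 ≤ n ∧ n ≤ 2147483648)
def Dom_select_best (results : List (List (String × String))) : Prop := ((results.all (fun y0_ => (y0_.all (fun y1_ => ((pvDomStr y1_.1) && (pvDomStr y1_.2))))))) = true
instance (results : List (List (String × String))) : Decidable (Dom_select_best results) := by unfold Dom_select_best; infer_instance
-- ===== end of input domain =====

-- B replaces A's intermediate YTS list and nested quality-by-quality rescan with one
-- best-so-far pass over results using a priority table (objective: simpler, one pass).

-- ===== PORT A =====
-- r.get(k) on the association-list encoding of a Python dict: first-match lookup
def sbGet (r : List (String × String)) (k : String) : Option String :=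
  (PySem.Dict.mk r).get? k

-- r.get("engine") == "YTS"
def sbIsYTS (r : List (String × String)) : Bool :=
  sbGet r "engine" == some "YTS"

def select_best (results : List (List (String × String))) : Option (List (String × String)) :=
  let qualities : List String := ["2160p", "1080p", "720p"]
  let yts_results := results.filter sbIsYTS
  -- for q in qualities: for r in yts_results: if r.get("quality") == q: return r
  match qualities.findSome? (fun q =>
      yts_results.find? (fun r => sbGet r "quality" == some q)) with
  | some r => some r
  | none => results.head?   -- results[0] if results else None

-- ===== PORT B =====
def sbPriority : PySem.Dict String Int := PySem.Dict.mk [("2160p", 0), ("1080p", 1), ("720p", 2)]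

-- r.get("engine") == "YTS" and r.get("quality") in priority
def sbCand (r : List (String × String)) : Bool :=
  sbGet r "engine" == some "YTS" &&
    (match sbGet r "quality" with
     | some q => (sbPriority.get? q).isSome
     | none => false)

-- priority[r["quality"]]; only evaluated on candidates, where the lookups succeed
def sbKey (r : List (String × String)) : Int :=
  sbPriority.getD ((sbGet r "quality").getD "") 3

def select_best_alt (results : List (List (String × String))) : Option (List (String × String)) :=
  let best := results.foldl (fun best r =>
    if sbCand r then
      match best with
      | none => some r
      | some b => if sbKey r < sbKey b then some r else some b
    else best) none
  match best with
  | some b => some b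
  | none => results.head?   -- results[0] if results else None

-- ===== PRECONDITION & SPEC =====
def Spec_select_best (results : List (List (String × String))) (out : Option (List (String × String))) : Prop := out = select_best_alt results
instance (results : List (List (String × String))) (out : Option (List (String × String))) : Decidable (Spec_select_best results out) := by unfold Spec_select_best; infer_instance

-- ===== CLAIM (what is proved, stated in full; the proofs are below) =====
def Claim_equal_select_best : Prop := ∀ (results : List (List (String × String))), Dom_select_best results → Spec_select_best results (select_best results)


-- ===== LEMMAS AND PROOFS =====

-- predicate "r.get('quality') == q" from A's inner loop
def sbPQ (q : String) (r : List (String × String)) : Bool :=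
  sbGet r "quality" == some q

-- r has a known quality (one of the three priority keys)
def sbKnown (r : List (String × String)) : Bool :=
  sbPQ "2160p" r || sbPQ "1080p" r || sbPQ "720p" r

-- the accumulator step of B's fold, with the candidate test already done
def sbStep (b : Option (List (String × String))) (r : List (String × String)) :
    Option (List (String × String)) :=
  match b with
  | none => some r
  | some b => if sbKey r < sbKey b then some r else some b

lemma sbPrio_isSome (q : String) :
    (sbPriority.get? q).isSome = (q == "2160p" || q == "1080p" || q == "720p") := by
  by_cases h0 : q = "2160p"
  · subst h0; decide
  by_cases h1 : q = "1080p"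
  · subst h1; decide
  by_cases h2 : q = "720p"
  · subst h2; decide
  · simp [sbPriority, PySem.Dict.get?, beq_iff_eq, h0, h1, h2, Ne.symm h0, Ne.symm h1,
      Ne.symm h2]

lemma sbCand_eq (r : List (String × String)) : sbCand r = (sbIsYTS r && sbKnown r) := by
  unfold sbCand sbIsYTS sbKnown sbPQ
  rcases h : sbGet r "quality" with _ | q
  · simp
  · simp [sbPrio_isSome]

lemma sbKey_of (r : List (String × String)) (q : String) (hq : sbGet r "quality" = some q) :
    sbKey r = sbPriority.getD q 3 := by
  unfold sbKey; rw [hq]; rfl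

lemma sbTri (r : List (String × String)) (h : sbKnown r = true) :
    (sbPQ "2160p" r = true ∧ sbKey r = 0) ∨
    (sbPQ "2160p" r = false ∧ sbPQ "1080p" r = true ∧ sbKey r = 1) ∨
    (sbPQ "2160p" r = false ∧ sbPQ "1080p" r = false ∧ sbPQ "720p" r = true ∧ sbKey r = 2) := by
  unfold sbKnown sbPQ at *
  rcases hq : sbGet r "quality" with _ | q
  · simp [hq] at h
  · have hk := sbKey_of r q hq
    simp only [hq, Option.some.injEq, beq_iff_eq, Bool.or_eq_true] at h ⊢
    rcases h with (h | h) | h <;> subst h <;> rw [hk] <;> simp <;> decide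

-- find? over a filter that only discards elements the predicate rejects
lemma sbFind_filter (l : List (List (String × String))) (p g : List (String × String) → Bool)
    (himp : ∀ r, p r = true → g r = true) : (l.filter g).find? p = l.find? p := by
  induction l with
  | nil => rfl
  | cons a t ih =>
    by_cases hg : g a = true
    · by_cases hp : p a = true <;> simp [hg, hp, ih]
    · have hp : p a = false := by
        rcases hpa : p a with _ | _
        · rfl
        · exact absurd (himp a hpa) hg
      simp [hg, hp, ih]

-- once a key-0 element is the best, the fold never replaces it
lemma sbS0 (t : List (List (String × String))) (x : List (String × String))
    (ht : ∀ r ∈ t, sbKnown r = true) (hx : sbKey x = 0) :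
    t.foldl sbStep (some x) = some x := by
  induction t with
  | nil => rfl
  | cons r t ih =>
    have hr := ht r (by simp)
    have hlt : ¬ (sbKey r < sbKey x) := by
      rcases sbTri r hr with ⟨_, hk⟩ | ⟨_, _, hk⟩ | ⟨_, _, _, hk⟩ <;> simp [hk, hx]
    simp only [List.foldl_cons, sbStep, if_neg hlt]
    exact ih (fun r hrm => ht r (by simp [hrm]))

lemma sbS1 (t : List (List (String × String))) (b : List (String × String))
    (ht : ∀ r ∈ t, sbKnown r = true) (hb : sbKey b = 1) :
    t.foldl sbStep (some b) = some ((t.find? (sbPQ "2160p")).getD b) := by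
  induction t with
  | nil => rfl
  | cons r t ih =>
    have hr := ht r (by simp)
    have ht' : ∀ r ∈ t, sbKnown r = true := fun r hrm => ht r (by simp [hrm])
    rcases sbTri r hr with ⟨h0, hk⟩ | ⟨h0, h1, hk⟩ | ⟨h0, h1, h2, hk⟩
    · have hlt : sbKey r < sbKey b := by rw [hk, hb]; decide
      simp only [List.foldl_cons, sbStep, if_pos hlt, List.find?_cons, h0]
      simp [sbS0 t r ht' hk]
    · have hlt : ¬ (sbKey r < sbKey b) := by rw [hk, hb]; decide
      simp only [List.foldl_cons, sbStep, if_neg hlt, List.find?_cons, h0]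
      exact ih ht'
    · have hlt : ¬ (sbKey r < sbKey b) := by rw [hk, hb]; decide
      simp only [List.foldl_cons, sbStep, if_neg hlt, List.find?_cons, h0]
      exact ih ht'

lemma sbS2 (t : List (List (String × String))) (b : List (String × String))
    (ht : ∀ r ∈ t, sbKnown r = true) (hb : sbKey b = 2) :
    t.foldl sbStep (some b) =
      some (((t.find? (sbPQ "2160p")).or (t.find? (sbPQ "1080p"))).getD b) := by
  induction t with
  | nil => rfl
  | cons r t ih =>
    have hr := ht r (by simp)
    have ht' : ∀ r ∈ t, sbKnown r = true := fun r hrm => ht r (by simp [hrm])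
    rcases sbTri r hr with ⟨h0, hk⟩ | ⟨h0, h1, hk⟩ | ⟨h0, h1, h2, hk⟩
    · have hlt : sbKey r < sbKey b := by rw [hk, hb]; decide
      simp only [List.foldl_cons, sbStep, if_pos hlt, List.find?_cons, h0]
      simp [sbS0 t r ht' hk]
    · have hlt : sbKey r < sbKey b := by rw [hk, hb]; decide
      simp only [List.foldl_cons, sbStep, if_pos hlt, List.find?_cons, h0, h1]
      rw [sbS1 t r ht' hk]
      rcases t.find? (sbPQ "2160p") with _ | x <;> rfl
    · have hlt : ¬ (sbKey r < sbKey b) := by rw [hk, hb]; decide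
      simp only [List.foldl_cons, sbStep, if_neg hlt, List.find?_cons, h0, h1]
      exact ih ht'

-- the best-so-far fold over known-quality candidates is A's quality-by-quality search
lemma sbE (c : List (List (String × String))) (hc : ∀ r ∈ c, sbKnown r = true) :
    c.foldl sbStep none =
      ((c.find? (sbPQ "2160p")).or ((c.find? (sbPQ "1080p")).or (c.find? (sbPQ "720p")))) := by
  induction c with
  | nil => rfl
  | cons r t ih =>
    have hr := hc r (by simp)
    have ht' : ∀ r ∈ t, sbKnown r = true := fun r hrm => hc r (by simp [hrm])
    have hstep : (r :: t).foldl sbStep none = t.foldl sbStep (some r) := rfl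
    rcases sbTri r hr with ⟨h0, hk⟩ | ⟨h0, h1, hk⟩ | ⟨h0, h1, h2, hk⟩
    · rw [hstep, sbS0 t r ht' hk]
      simp [List.find?_cons, h0]
    · rw [hstep, sbS1 t r ht' hk]
      simp only [List.find?_cons, h0, h1]
      rcases t.find? (sbPQ "2160p") with _ | x <;> rfl
    · rw [hstep, sbS2 t r ht' hk]
      simp only [List.find?_cons, h0, h1, h2]
      rcases t.find? (sbPQ "2160p") with _ | x <;>
        rcases t.find? (sbPQ "1080p") with _ | y <;> rfl

-- each of A's inner predicates implies a known quality
lemma sbPQ_known (q : String) (hq : q = "2160p" ∨ q = "1080p" ∨ q = "720p") (r : List (String × String))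
    (hp : sbPQ q r = true) : sbKnown r = true := by
  unfold sbKnown
  rcases hq with h | h | h <;> subst h <;> simp [hp]

-- ===== VERDICT (by name: the statement is the Claim_ definition above) =====
theorem select_best_spec : Claim_equal_select_best := by
  intro results _
  unfold Spec_select_best select_best select_best_alt
  have hfold : results.foldl (fun best r =>
      if sbCand r then
        match best with
        | none => some r
        | some b => if sbKey r < sbKey b then some r else some b
      else best) none = (results.filter sbCand).foldl sbStep none := by
    rw [List.foldl_filter]
    rfl
  have hcands : results.filter sbCand = (results.filter sbIsYTS).filter sbKnown := by
    rw [List.filter_filter]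
    apply List.filter_congr
    intro r _
    rw [sbCand_eq]
    exact Bool.and_comm _ _
  have hknown : ∀ r ∈ results.filter sbCand, sbKnown r = true := by
    intro r hrm
    rw [hcands] at hrm
    exact (List.mem_filter.mp hrm).2
  have hfind : ∀ q : String, q = "2160p" ∨ q = "1080p" ∨ q = "720p" →
      (results.filter sbIsYTS).find? (sbPQ q) = (results.filter sbCand).find? (sbPQ q) := by
    intro q hq
    rw [hcands]
    exact (sbFind_filter _ _ _ (sbPQ_known q hq)).symm
  simp only [hfold, sbE (results.filter sbCand) hknown]
  rw [← hfind "2160p" (by tauto), ← hfind "1080p" (by tauto), ← hfind "720p" (by tauto)]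
  simp only [List.findSome?_cons]
  simp only [show ∀ q, sbPQ q = fun r => sbGet r "quality" == some q from fun _ => rfl]
  generalize (List.find? (fun r => sbGet r "quality" == some "2160p") (List.filter sbIsYTS results)) = oA
  generalize (List.find? (fun r => sbGet r "quality" == some "1080p") (List.filter sbIsYTS results)) = oB
  generalize (List.find? (fun r => sbGet r "quality" == some "720p") (List.filter sbIsYTS results)) = oC
  rcases oA with _ | x <;> rcases oB with _ | y <;> rcases oC with _ | z <;> rfl
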